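-- pv_equiv track=rewrite | github.com/sebdenes/AgenticAICoach | modules/periodization.py | _assign_phases
-- ===== SOURCE A (Python) =====
-- def _assign_phases(weeks: int) -> list[tuple[str, int]]:
--     """Decide phase allocation.
--
--     The total weeks MUST equal the input. Recovery weeks are budgeted
--     from the total (3:1 pattern — every 4th week is recovery).
--
--     Rules:
--     - Race week: last week (always 1 week)
--     - Taper: 2 weeks for <= 8 total, 3 weeks for > 12, else 2
--     - Recovery: 1 per 4 remaining weeks, inserted after every 3 load weeks
--     - Load weeks split: base (~60%) + build (~40%)
--
--     Returns
--     -------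
--     list[tuple[str, int]]
--         Ordered list of (phase_name, num_weeks).
--     """
--     if weeks <= 0:
--         return [("race", 1)]
--
--     # Race week
--     race_weeks = 1
--     remaining = weeks - race_weeks
--
--     if remaining <= 0:
--         return [("race", 1)]
--
--     # Taper
--     if weeks <= 8:
--         taper_weeks = min(2, remaining)
--     elif weeks > 12:
--         taper_weeks = min(3, remaining)
--     else:
--         taper_weeks = min(2, remaining)
--     remaining -= taper_weeks
--
--     if remaining <= 0:
--         return [("taper", taper_weeks), ("race", race_weeks)]
--
--     # Budget recovery weeks from within remaining (3:1 pattern)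
--     recovery_weeks = remaining // 4 if remaining >= 4 else 0
--     load_weeks = remaining - recovery_weeks
--
--     # Split load between base (60%) and build (40%)
--     base_count = max(1, round(load_weeks * 0.6))
--     build_count = load_weeks - base_count
--
--     # Build flat load list: base then build
--     load_list = ["base"] * base_count + ["build"] * build_count
--
--     # Insert recovery after every 3rd load week
--     phases_flat: list[str] = []
--     load_counter = 0
--     recoveries_placed = 0
--     for phase in load_list:
--         phases_flat.append(phase)
--         load_counter += 1
--         if load_counter == 3 and recoveries_placed < recovery_weeks:
--             phases_flat.append("recovery")
--             recoveries_placed += 1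
--             load_counter = 0
--
--     # Append taper + race
--     phases_flat.extend(["taper"] * taper_weeks)
--     phases_flat.append("race")
--
--     # Collapse consecutive same-phase into (phase, count) tuples
--     result: list[tuple[str, int]] = []
--     for phase in phases_flat:
--         if result and result[-1][0] == phase:
--             result[-1] = (phase, result[-1][1] + 1)
--         else:
--             result.append((phase, 1))
--
--     return result
-- ===== SOURCE B (Python) =====
-- def _assign_phases(weeks: int) -> list[tuple[str, int]]:
--     """Same allocation as the original, but emits (phase, count) runs
--     directly, block of three load weeks at a time, instead of building a
--     per-week flat list and run-length collapsing it afterwards."""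
--     if weeks <= 0:
--         return [("race", 1)]
--     remaining = weeks - 1
--     if remaining <= 0:
--         return [("race", 1)]
--     taper = min(3 if weeks > 12 else 2, remaining)
--     remaining -= taper
--     if remaining <= 0:
--         return [("taper", taper), ("race", 1)]
--     rec = remaining // 4 if remaining >= 4 else 0
--     load = remaining - rec
--     base = max(1, round(load * 0.6))
--
--     runs: list[tuple[str, int]] = []
--
--     def push(phase: str, n: int) -> None:
--         if n <= 0:
--             return
--         if runs and runs[-1][0] == phase:
--             runs[-1] = (phase, runs[-1][1] + n)
--         else:
--             runs.append((phase, n))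
--
--     pos = 0          # load weeks emitted so far
--     placed = 0       # recovery weeks placed so far
--     while pos < load:
--         blk = min(3, load - pos)
--         nb = max(0, min(base - pos, blk))   # base weeks inside this block
--         push("base", nb)
--         push("build", blk - nb)
--         pos += blk
--         if blk == 3 and placed < rec:
--             push("recovery", 1)
--             placed += 1
--     push("taper", taper)
--     push("race", 1)
--     return runs
-- ===== Notes on version B (the rewrite author's own statement) =====
-- stated objective: alternative
-- what changed: B keeps A's budgeting arithmetic but emits (phase,count) runs directly, walking the load weeks in blocks of three and coalescing runs as it goes, instead of A's building a per-week flat list and run-length-collapsing it afterwards.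
import Mathlib
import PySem

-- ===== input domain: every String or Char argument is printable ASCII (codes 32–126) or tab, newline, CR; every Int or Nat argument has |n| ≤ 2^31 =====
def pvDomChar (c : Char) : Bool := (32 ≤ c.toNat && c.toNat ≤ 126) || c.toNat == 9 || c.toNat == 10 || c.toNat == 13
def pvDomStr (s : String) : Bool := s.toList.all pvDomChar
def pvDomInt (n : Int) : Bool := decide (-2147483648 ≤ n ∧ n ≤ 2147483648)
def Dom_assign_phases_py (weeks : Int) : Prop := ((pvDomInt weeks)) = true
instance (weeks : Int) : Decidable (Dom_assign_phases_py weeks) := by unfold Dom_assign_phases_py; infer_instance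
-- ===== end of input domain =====

-- B emits (phase,count) runs block-wise instead of A's per-week flat list + run-length collapse; same values.

-- ===== PORT A =====
-- Exact integer model of Python's round(n * 0.6): 0.6 as an IEEE-754 double is
-- 5404319552844595/2^53; the product is rounded to the nearest double (ties to even),
-- then round() applies round-half-to-even.  Exact on the stated domain |n| ≤ 2^31;
-- shared by both ports because both Pythons call the same builtin round(load_weeks * 0.6).
def pyRoundHalfEven (num den : Int) : Int :=
  if 2 * num.fmod den < den then num.fdiv den
  else if den < 2 * num.fmod den then num.fdiv den + 1
  else if num.fdiv den % 2 = 0 then num.fdiv den else num.fdiv den + 1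

-- round the 2^53-scaled integer m to the precision of a 53-bit significand (ties to even)
def pyShift52 (m : Int) : Int :=
  if 52 < m.natAbs.log2 then
    pyRoundHalfEven m (2 ^ (m.natAbs.log2 - 52)) * 2 ^ (m.natAbs.log2 - 52)
  else m

def pyRound06 (n : Int) : Int :=
  if n * 5404319552844595 = 0 then 0
  else pyRoundHalfEven (pyShift52 (n * 5404319552844595)) (2 ^ 53)

-- body of A's collapse loop: result[-1] update or append
def aCollapseStep (res : List (String × Int)) (phase : String) : List (String × Int) :=
  match res.getLast? with
  | some last => if last.1 = phase then res.dropLast ++ [(phase, last.2 + 1)] else res ++ [(phase, 1)]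
  | none => res ++ [(phase, 1)]

-- body of A's flat-building loop; state = (phases_flat, load_counter, recoveries_placed)
def aFlatStep (rec : Int) (st : List String × Int × Int) (phase : String) : List String × Int × Int :=
  match st with
  | (fl, lc, rp) =>
    if lc + 1 = 3 ∧ rp < rec then (fl ++ [phase] ++ ["recovery"], 0, rp + 1)
    else (fl ++ [phase], lc + 1, rp)

def assign_phases_py (weeks : Int) : List (String × Int) :=
  if weeks ≤ 0 then [("race", 1)]
  else
    let race_weeks : Int := 1
    let remaining := weeks - race_weeks
    if remaining ≤ 0 then [("race", 1)]
    else
      let taper_weeks :=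
        if weeks ≤ 8 then min 2 remaining
        else if 12 < weeks then min 3 remaining
        else min 2 remaining
      let remaining := remaining - taper_weeks
      if remaining ≤ 0 then [("taper", taper_weeks), ("race", race_weeks)]
      else
        let recovery_weeks := if 4 ≤ remaining then remaining.fdiv 4 else 0
        let load_weeks := remaining - recovery_weeks
        let base_count := max 1 (pyRound06 load_weeks)
        let build_count := load_weeks - base_count
        let load_list :=
          List.replicate base_count.toNat "base" ++ List.replicate build_count.toNat "build"
        let st := load_list.foldl (aFlatStep recovery_weeks) ([], 0, 0)
        let phases_flat := st.1 ++ List.replicate taper_weeks.toNat "taper" ++ ["race"]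
        phases_flat.foldl aCollapseStep []

-- ===== PORT B =====
-- push(phase, n): append a run, coalescing with the last run if the phase matches
def bPush (runs : List (String × Int)) (phase : String) (n : Int) : List (String × Int) :=
  if n ≤ 0 then runs
  else
    match runs.getLast? with
    | some last => if last.1 = phase then runs.dropLast ++ [(phase, last.2 + n)] else runs ++ [(phase, n)]
    | none => runs ++ [(phase, n)]

-- B's while loop over the load weeks, a block of at most three at a time
def bBlocks (load base rec pos placed : Int) (runs : List (String × Int)) : List (String × Int) :=
  if pos < load then
    let blk := min 3 (load - pos)
    let nb := max 0 (min (base - pos) blk)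
    let runs' := bPush (bPush runs "base" nb) "build" (blk - nb)
    if blk = 3 ∧ placed < rec then
      bBlocks load base rec (pos + blk) (placed + 1) (bPush runs' "recovery" 1)
    else
      bBlocks load base rec (pos + blk) placed runs'
  else runs
termination_by (load - pos).toNat
decreasing_by all_goals omega

def assign_phases_py_alt (weeks : Int) : List (String × Int) :=
  if weeks ≤ 0 then [("race", 1)]
  else
    let remaining := weeks - 1
    if remaining ≤ 0 then [("race", 1)]
    else
      let taper := min (if 12 < weeks then 3 else 2) remaining
      let remaining := remaining - taper
      if remaining ≤ 0 then [("taper", taper), ("race", 1)]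
      else
        let rec_ := if 4 ≤ remaining then remaining.fdiv 4 else 0
        let load := remaining - rec_
        let base := max 1 (pyRound06 load)
        bPush (bPush (bBlocks load base rec_ 0 0 []) "taper" taper) "race" 1

-- ===== PRECONDITION & SPEC =====
def Spec_assign_phases_py (weeks : Int) (out : List (String × Int)) : Prop := out = assign_phases_py_alt weeks
instance (weeks : Int) (out : List (String × Int)) : Decidable (Spec_assign_phases_py weeks out) := by unfold Spec_assign_phases_py; infer_instance

-- ===== CLAIM (what is proved, stated in full; the proofs are below) =====
def Claim_equal_assign_phases_py : Prop := ∀ (weeks : Int), Dom_assign_phases_py weeks → Spec_assign_phases_py weeks (assign_phases_py weeks)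

-- ===== LEMMAS AND PROOFS =====

-- abstract form of A's flat-building loop
def aFlatList (rec : Int) : List String → Int → Int → List String
  | [], _, _ => []
  | x :: xs, lc, rp =>
    if lc + 1 = 3 ∧ rp < rec then x :: "recovery" :: aFlatList rec xs 0 (rp + 1)
    else x :: aFlatList rec xs (lc + 1) rp

theorem foldl_aFlatStep (rec : Int) (l : List String) : ∀ (fl : List String) (lc rp : Int),
    (List.foldl (aFlatStep rec) (fl, lc, rp) l).1 = fl ++ aFlatList rec l lc rp := by
  induction l with
  | nil => intro fl lc rp; simp [aFlatList]
  | cons x xs ih =>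
    intro fl lc rp
    simp only [List.foldl_cons, aFlatStep, aFlatList]
    split
    · rw [ih]; simp
    · rw [ih]; simp

theorem aFlatList_ge (rec : Int) (l : List String) : ∀ (lc rp : Int), rec ≤ rp →
    aFlatList rec l lc rp = l := by
  induction l with
  | nil => intro lc rp h; simp [aFlatList]
  | cons x xs ih =>
    intro lc rp h
    simp only [aFlatList]
    rw [if_neg (by omega), ih _ _ h]

theorem aFlatList_short (rec : Int) (l : List String) (rp : Int) (h : l.length < 3) :
    aFlatList rec l 0 rp = l := by
  match l, h with
  | [], _ => simp [aFlatList]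
  | [a], _ => norm_num [aFlatList]
  | [a, b], _ => norm_num [aFlatList]

theorem aFlatList_unroll (rec : Int) (a b c : String) (l : List String) (rp : Int) (h : rp < rec) :
    aFlatList rec (a :: b :: c :: l) 0 rp = a :: b :: c :: "recovery" :: aFlatList rec l 0 (rp + 1) := by
  norm_num [aFlatList, h]

theorem collapse_push1 (runs : List (String × Int)) (p : String) :
    aCollapseStep runs p = bPush runs p 1 := by
  unfold aCollapseStep bPush
  rcases h : runs.getLast? with _ | last <;> simp

theorem bPush_bPush (runs : List (String × Int)) (p : String) (m n : Int)
    (hm : 0 < m) (hn : 0 < n) : bPush (bPush runs p m) p n = bPush runs p (m + n) := by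
  unfold bPush
  rw [if_neg (by omega), if_neg (by omega), if_neg (by omega)]
  rcases h : runs.getLast? with _ | last
  · simp [List.getLast?_concat, List.dropLast_concat, add_comm m n]
  · by_cases hp : last.1 = p
    · simp [hp, List.getLast?_concat, List.dropLast_concat, add_assoc]
    · simp [hp, List.getLast?_concat, List.dropLast_concat, add_comm m n]

theorem foldl_replicate_push (p : String) : ∀ (k : Nat) (runs : List (String × Int)),
    List.foldl aCollapseStep runs (List.replicate k p) = bPush runs p (k : Int) := by
  intro k
  induction k with
  | zero => intro runs; simp [bPush]
  | succ k ih =>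
    intro runs
    rw [List.replicate_succ, List.foldl_cons, ih, collapse_push1]
    rcases Nat.eq_zero_or_pos k with hk | hk
    · subst hk
      simp [bPush]
    · rw [bPush_bPush _ _ _ _ (by norm_num) (by exact_mod_cast hk)]
      congr 1
      push_cast
      ring

theorem bPush_eq_foldl (runs : List (String × Int)) (p : String) (n : Int) :
    bPush runs p n = List.foldl aCollapseStep runs (List.replicate n.toNat p) := by
  by_cases h : n ≤ 0
  · rw [Int.toNat_of_nonpos h]
    simp [bPush, h]
  · rw [foldl_replicate_push]
    congr 1
    omega

-- the still-unprocessed load weeks, flattened: rem weeks, the first (max 0 (min bb rem)) being base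
def loadTail (rem bb : Int) : List String :=
  List.replicate (max 0 (min bb rem)).toNat "base" ++
    List.replicate (rem - max 0 (min bb rem)).toNat "build"

theorem loadTail_nonpos (rem bb : Int) (h : rem ≤ 0) : loadTail rem bb = [] := by
  unfold loadTail
  rw [Int.toNat_of_nonpos (by omega), Int.toNat_of_nonpos (by omega)]
  simp

theorem loadTail_split3 (rem bb : Int) (h : 3 ≤ rem) :
    loadTail rem bb =
      (List.replicate (max 0 (min bb 3)).toNat "base" ++
        List.replicate (3 - max 0 (min bb 3)).toNat "build") ++ loadTail (rem - 3) (bb - 3) := by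
  unfold loadTail
  by_cases h3 : 3 ≤ bb
  · have e1 : (max 0 (min bb 3)).toNat = 3 := by omega
    have e2 : (3 - max 0 (min bb 3)).toNat = 0 := by omega
    have e3 : (max 0 (min bb rem)).toNat = 3 + (max 0 (min (bb - 3) (rem - 3))).toNat := by omega
    have e4 : (rem - max 0 (min bb rem)).toNat = (rem - 3 - max 0 (min (bb - 3) (rem - 3))).toNat := by omega
    rw [e1, e2, e3, e4, List.replicate_add]
    simp
  · by_cases h0 : bb ≤ 0
    · have e1 : (max 0 (min bb 3)).toNat = 0 := by omega
      have e2 : (3 - max 0 (min bb 3)).toNat = 3 := by omega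
      have e3 : (max 0 (min bb rem)).toNat = 0 := by omega
      have e4 : (max 0 (min (bb - 3) (rem - 3))).toNat = 0 := by omega
      have e5 : (rem - max 0 (min bb rem)).toNat = 3 + (rem - 3 - max 0 (min (bb - 3) (rem - 3))).toNat := by omega
      rw [e1, e2, e3, e4, e5, List.replicate_add]
      simp
    · have e1 : (max 0 (min bb 3)).toNat = bb.toNat := by omega
      have e2 : (max 0 (min bb rem)).toNat = bb.toNat := by omega
      have e3 : (max 0 (min (bb - 3) (rem - 3))).toNat = 0 := by omega
      have e4 : (rem - max 0 (min bb rem)).toNat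
          = (3 - max 0 (min bb 3)).toNat + (rem - 3 - max 0 (min (bb - 3) (rem - 3))).toNat := by omega
      rw [e1, e2, e3, e4, List.replicate_add]
      simp

-- B's block loop computes the run-length collapse of A's flat list over the remaining load weeks
theorem bBlocks_eq : ∀ (n : Nat) (load base rec pos placed : Int) (runs : List (String × Int)),
    (load - pos).toNat ≤ n →
    bBlocks load base rec pos placed runs =
      List.foldl aCollapseStep runs (aFlatList rec (loadTail (load - pos) (base - pos)) 0 placed) := by
  intro n
  induction n with
  | zero =>
    intro load base rec pos placed runs h
    rw [loadTail_nonpos _ _ (by omega)]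
    rw [bBlocks, if_neg (by omega)]
    simp [aFlatList]
  | succ n ih =>
    intro load base rec pos placed runs h
    by_cases hlt : pos < load
    case neg =>
      rw [loadTail_nonpos _ _ (by omega)]
      rw [bBlocks, if_neg (by omega)]
      simp [aFlatList]
    rw [bBlocks, if_pos hlt]
    dsimp only
    by_cases h3 : 3 ≤ load - pos
    · -- full block of 3
      have hblk : min 3 (load - pos) = 3 := by omega
      rw [loadTail_split3 _ _ h3]
      set nb := max 0 (min (base - pos) 3) with hnb
      have hnb3 : min (base - pos) (min 3 (load - pos)) = min (base - pos) 3 := by omega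
      have hseg : ∀ (tail : List String) (rs : List (String × Int)),
          List.foldl aCollapseStep rs
            ((List.replicate nb.toNat "base" ++ List.replicate (3 - nb).toNat "build") ++ tail)
          = List.foldl aCollapseStep
              (bPush (bPush rs "base" (max 0 (min (base - pos) (min 3 (load - pos)))))
                "build" (min 3 (load - pos) - max 0 (min (base - pos) (min 3 (load - pos))))) tail := by
        intro tail rs
        rw [List.append_assoc, List.foldl_append, List.foldl_append,
          ← bPush_eq_foldl, ← bPush_eq_foldl, hnb3, hblk]
      have htail : loadTail (load - pos - 3) (base - pos - 3)
          = loadTail (load - (pos + min 3 (load - pos))) (base - (pos + min 3 (load - pos))) := by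
        rw [hblk]
        ring_nf
      by_cases hpr : placed < rec
      · -- a recovery follows this block
        rw [if_pos ⟨hblk, hpr⟩]
        have hseg3 : ∃ a b c, List.replicate nb.toNat "base" ++ List.replicate (3 - nb).toNat "build" = [a, b, c] := by
          have hlen : nb.toNat + (3 - nb).toNat = 3 := by omega
          rcases e : (List.replicate nb.toNat "base" ++ List.replicate (3 - nb).toNat "build") with _ | ⟨a, _ | ⟨b, _ | ⟨c, _ | _⟩⟩⟩ <;>
            first
              | (exfalso; have := congrArg List.length e; simp at this; omega)
              | exact ⟨_, _, _, rfl⟩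
        obtain ⟨a, b, c, habc⟩ := hseg3
        rw [habc]
        simp only [List.cons_append, List.nil_append]
        rw [aFlatList_unroll _ _ _ _ _ _ hpr]
        have hre : (a :: b :: c :: "recovery" :: aFlatList rec (loadTail (load - pos - 3) (base - pos - 3)) 0 (placed + 1))
            = ((List.replicate nb.toNat "base" ++ List.replicate (3 - nb).toNat "build") ++ ["recovery"])
              ++ aFlatList rec (loadTail (load - pos - 3) (base - pos - 3)) 0 (placed + 1) := by
          rw [habc]
          rfl
        rw [hre, List.foldl_append, hseg]
        simp only [List.foldl_cons, List.foldl_nil]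
        rw [collapse_push1, htail]
        exact ih _ _ _ _ _ _ (by omega)
      · -- recovery budget exhausted: the flat list is just the remaining load weeks
        rw [if_neg (by omega)]
        have e1 : max 0 (min (base - pos) (min 3 (load - pos))) = nb := by omega
        have e2 : min 3 (load - pos) - nb = 3 - nb := by omega
        rw [e1, e2, ih _ _ _ _ _ _ (by omega), ← htail]
        rw [aFlatList_ge _ _ _ _ (by omega), aFlatList_ge _ _ _ _ (by omega)]
        rw [List.foldl_append, List.foldl_append, ← bPush_eq_foldl, ← bPush_eq_foldl]
    · -- final partial block (1 or 2 weeks): no recovery, loop ends after it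
      have hblk : min 3 (load - pos) = load - pos := by omega
      rw [if_neg (by omega)]
      rw [bBlocks, if_neg (by omega)]
      rw [aFlatList_short _ _ _ (by unfold loadTail; simp; omega)]
      unfold loadTail
      rw [List.foldl_append, ← bPush_eq_foldl, ← bPush_eq_foldl]
      congr 2 <;> omega

-- ---- exactness facts about pyRound06 ----

theorem rhe_le_half (m d : Int) (hd : 0 < d) : 2 * (pyRoundHalfEven m d * d) ≤ 2 * m + d := by
  unfold pyRoundHalfEven
  have hqr : d * m.fdiv d + m.fmod d = m := Int.mul_fdiv_add_fmod m d
  have hr0 : 0 ≤ m.fmod d := Int.fmod_nonneg_of_pos m hd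
  have hrd : m.fmod d < d := Int.fmod_lt_of_pos m hd
  split_ifs <;> nlinarith [hqr, hr0, hrd]

theorem rhe_le (m d n : Int) (hd : 0 < d) (h : 2 * m < (2 * n + 1) * d) :
    pyRoundHalfEven m d ≤ n := by
  unfold pyRoundHalfEven
  have hqr : d * m.fdiv d + m.fmod d = m := Int.mul_fdiv_add_fmod m d
  have hr0 : 0 ≤ m.fmod d := Int.fmod_nonneg_of_pos m hd
  have hrd : m.fmod d < d := Int.fmod_lt_of_pos m hd
  split_ifs with h1 h2 h3
  · by_contra hc
    push_neg at hc
    have hp : (n + 1) * d ≤ m.fdiv d * d :=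
      mul_le_mul_of_nonneg_right (by omega) (le_of_lt hd)
    nlinarith [hqr, hr0]
  · by_contra hc
    push_neg at hc
    have hp : n * d ≤ m.fdiv d * d :=
      mul_le_mul_of_nonneg_right (by omega) (le_of_lt hd)
    nlinarith [hqr, hrd]
  · by_contra hc
    push_neg at hc
    have hp : (n + 1) * d ≤ m.fdiv d * d :=
      mul_le_mul_of_nonneg_right (by omega) (le_of_lt hd)
    nlinarith [hqr, hr0]
  · by_contra hc
    push_neg at hc
    have hp : n * d ≤ m.fdiv d * d :=
      mul_le_mul_of_nonneg_right (by omega) (le_of_lt hd)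
    nlinarith [hqr, hrd]

theorem pyRound06_le (n : Int) (h1 : 1 ≤ n) (h2 : n ≤ 2 ^ 31) : pyRound06 n ≤ n := by
  unfold pyRound06
  rw [if_neg (by positivity)]
  apply rhe_le _ _ _ (by positivity)
  have hMn : n * 5404319552844595 ≤ n * 9007199254740992 := by nlinarith
  have hnM : (0:Int) < n * 5404319552844595 := by positivity
  unfold pyShift52
  split_ifs with h52
  · have hk : (n * 5404319552844595).natAbs.log2 < 84 := by
      rw [Nat.log2_lt (by omega)]
      have : (n * 5404319552844595).natAbs ≤ (2 ^ 31 * 5404319552844595 : Int).natAbs := by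
        rw [Int.natAbs_le_iff_sq_le] <;> nlinarith
      calc (n * 5404319552844595).natAbs ≤ (2 ^ 31 * 5404319552844595 : Int).natAbs := this
        _ < 2 ^ 84 := by norm_num
    have hdpos : (0:Int) < 2 ^ ((n * 5404319552844595).natAbs.log2 - 52) := by positivity
    have hdle : (2:Int) ^ ((n * 5404319552844595).natAbs.log2 - 52) ≤ 2 ^ 31 := by
      apply pow_le_pow_right₀ (by norm_num)
      omega
    have hhalf := rhe_le_half (n * 5404319552844595)
      (2 ^ ((n * 5404319552844595).natAbs.log2 - 52)) hdpos
    nlinarith [hhalf, hdle, hMn, h1]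
  · nlinarith [hMn, h1]

-- ===== VERDICT (by name: the statement is the Claim_ definition above) =====
theorem assign_phases_py_spec : Claim_equal_assign_phases_py := by
  unfold Claim_equal_assign_phases_py
  intro weeks hdom
  unfold Spec_assign_phases_py
  have hwle : weeks ≤ 2147483648 := by
    simp only [Dom_assign_phases_py, pvDomInt, decide_eq_true_eq] at hdom
    omega
  by_cases h0 : weeks ≤ 0
  · simp only [assign_phases_py, assign_phases_py_alt, if_pos h0]
  · by_cases h1 : weeks - 1 ≤ 0
    · simp only [assign_phases_py, assign_phases_py_alt, if_neg h0]
      rw [if_pos h1, if_pos h1]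
    · have htap : (if weeks ≤ 8 then min 2 (weeks - 1)
          else if 12 < weeks then min 3 (weeks - 1) else min 2 (weeks - 1))
          = min (if 12 < weeks then 3 else 2) (weeks - 1) := by
        split_ifs <;> omega
      simp only [assign_phases_py, assign_phases_py_alt, if_neg h0]
      rw [if_neg h1, if_neg h1, htap]
      set t := min (if 12 < weeks then 3 else 2 : Int) (weeks - 1) with ht
      have ht1 : 1 ≤ t := by
        rw [ht]
        split_ifs <;> omega
      by_cases h2 : weeks - 1 - t ≤ 0
      · rw [if_pos h2, if_pos h2]
      · rw [if_neg h2, if_neg h2]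
        set rem := weeks - 1 - t with hrem
        set rc := (if 4 ≤ rem then rem.fdiv 4 else 0) with hrc
        have hrc0 : 0 ≤ rc ∧ (4 ≤ rem → rc ≤ rem - 3) := by
          rw [hrc]
          split_ifs with h4
          · rw [Int.fdiv_eq_ediv_of_nonneg _ (by omega)]
            omega
          · omega
        have hload1 : 1 ≤ rem - rc := by omega
        have hloadle : rem - rc ≤ 2 ^ 31 := by omega
        set load := rem - rc with hload
        set bse := max 1 (pyRound06 load) with hbse
        have hb1 : 1 ≤ bse := le_max_left _ _
        have hble : bse ≤ load := by
          have := pyRound06_le load hload1 hloadle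
          omega
        -- A's load list is B's loadTail
        have hlist : List.replicate bse.toNat "base" ++ List.replicate (load - bse).toNat "build"
            = loadTail (load - 0) (bse - 0) := by
          unfold loadTail
          congr 2 <;> omega
        rw [foldl_aFlatStep, List.nil_append, hlist]
        rw [bBlocks_eq ((load - 0).toNat) _ _ _ _ _ _ (le_refl _)]
        rw [bPush_eq_foldl, bPush_eq_foldl, List.append_assoc, List.foldl_append,
          List.foldl_append]
        have hone : (1 : Int).toNat = 1 := rfl
        rw [hone]
        simp [List.foldl_cons]
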